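-- pv_equiv track=rewrite | github.com/arti-max/BoxLang6 | boxlang6/compiler/preprocessor.py | _collect_ifdef_block
-- ===== SOURCE A (Python) =====
-- from typing import Dict, Optional, Tuple
--
-- def _collect_ifdef_block(
--     lines: list, start: int
-- ) -> Tuple[Dict[str, list], int]:
--     """
--     Собирает then/else ветки и возвращает
--     ({"then": [...], "else": [...]}, количество_потреблённых_строк).
--     """
--     then_lines = []
--     else_lines = []
--     in_else    = False
--     depth      = 0   # вложенные $ifdef
--     i          = start + 1
--     consumed   = 1
--
--     while i < len(lines):
--         s = lines[i].strip()
--         consumed += 1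
--
--         if s.startswith("$ifdef ") or s.startswith("$ifndef "):
--             depth += 1
--             (else_lines if in_else else then_lines).append(lines[i])
--
--         elif s == "$endif":
--             if depth == 0:
--                 break   # наш $endif
--             depth -= 1
--             (else_lines if in_else else then_lines).append(lines[i])
--
--         elif s == "$else" and depth == 0:
--             in_else = True
--
--         else:
--             (else_lines if in_else else then_lines).append(lines[i])
--
--         i += 1
--
--     return {"then": then_lines, "else": else_lines}, consumed
-- ===== SOURCE B (Python) =====
-- def _consume_nested(lines, i):
--     """Copy lines verbatim until (and including) the $endif matching an
--     already-seen opener; return (copied_lines, index_after)."""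
--     out = []
--     while i < len(lines):
--         s = lines[i].strip()
--         out.append(lines[i])
--         i += 1
--         if s.startswith("$ifdef ") or s.startswith("$ifndef "):
--             inner, i = _consume_nested(lines, i)
--             out.extend(inner)
--         elif s == "$endif":
--             break
--     return out, i
--
--
-- def _collect_ifdef_block(lines, start):
--     then_lines = []
--     else_lines = []
--     branch = then_lines
--     i = start + 1
--     consumed = 1
--     while i < len(lines):
--         s = lines[i].strip()
--         consumed += 1
--         if s.startswith("$ifdef ") or s.startswith("$ifndef "):
--             branch.append(lines[i])
--             inner, j = _consume_nested(lines, i + 1)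
--             branch.extend(inner)
--             consumed += j - (i + 1)
--             i = j
--             continue
--         if s == "$endif":
--             break
--         if s == "$else":
--             branch = else_lines
--         else:
--             branch.append(lines[i])
--         i += 1
--     return {"then": then_lines, "else": else_lines}, consumed
-- ===== Notes on version B (the rewrite author's own statement) =====
-- stated objective: alternative
-- what changed: Replaces A's single loop with a numeric nesting-depth counter by recursive descent: a helper consumes a whole nested $ifdef...$endif block verbatim and returns the index after it, so the top-level loop only dispatches on top-level lines.
import Mathlib
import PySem

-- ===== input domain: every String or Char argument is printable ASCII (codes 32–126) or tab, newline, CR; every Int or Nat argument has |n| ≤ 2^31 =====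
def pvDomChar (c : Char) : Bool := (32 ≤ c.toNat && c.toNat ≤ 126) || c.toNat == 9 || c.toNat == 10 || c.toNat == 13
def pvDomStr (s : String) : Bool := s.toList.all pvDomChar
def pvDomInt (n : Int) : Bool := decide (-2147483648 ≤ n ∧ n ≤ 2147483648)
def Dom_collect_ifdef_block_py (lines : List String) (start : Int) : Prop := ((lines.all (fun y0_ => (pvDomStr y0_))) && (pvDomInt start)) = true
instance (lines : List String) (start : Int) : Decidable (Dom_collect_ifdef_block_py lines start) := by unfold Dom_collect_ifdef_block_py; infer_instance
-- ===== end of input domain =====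

-- B replaces A's numeric nesting-depth counter by recursive descent (a helper consumes a whole
-- nested $ifdef…$endif block verbatim); same cost, a different decomposition.


-- Shared one-liners both Pythons perform verbatim: lines[i] (Python indexing), lines[i].strip(),
-- and the test s.startswith("$ifdef ") or s.startswith("$ifndef ").
def pvLine (lines : List String) (i : Int) : String := (PySem.List.pyGet? lines i).getD ""   -- none only outside Pre_
def pvStrip (lines : List String) (i : Int) : String := PySem.Str.strip (pvLine lines i)
def pvOpens (s : String) : Bool := PySem.Str.startswith s "$ifdef " || PySem.Str.startswith s "$ifndef "

-- ===== PORT A =====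
-- A's loop: one pass with a numeric depth counter; fuel = number of remaining loop iterations
-- (each iteration advances i by 1), so it runs out exactly when i reaches len(lines).
def aLoop (lines : List String) : Nat → Int → List String → List String → Bool → Int → Int →
    List String × List String × Int
  | 0, _, thenL, elseL, _, _, consumed => (thenL, elseL, consumed)
  | fuel+1, i, thenL, elseL, inElse, depth, consumed =>
    if i < (lines.length : Int) then
      if pvOpens (pvStrip lines i) then
        aLoop lines fuel (i+1) (if inElse then thenL else thenL ++ [pvLine lines i])
          (if inElse then elseL ++ [pvLine lines i] else elseL) inElse (depth + 1) (consumed + 1)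
      else if pvStrip lines i = "$endif" then
        if depth = 0 then (thenL, elseL, consumed + 1)
        else
          aLoop lines fuel (i+1) (if inElse then thenL else thenL ++ [pvLine lines i])
            (if inElse then elseL ++ [pvLine lines i] else elseL) inElse (depth - 1) (consumed + 1)
      else if pvStrip lines i = "$else" ∧ depth = 0 then
        aLoop lines fuel (i+1) thenL elseL true depth (consumed + 1)
      else
        aLoop lines fuel (i+1) (if inElse then thenL else thenL ++ [pvLine lines i])
          (if inElse then elseL ++ [pvLine lines i] else elseL) inElse depth (consumed + 1)
    else (thenL, elseL, consumed)

def collect_ifdef_block_py (lines : List String) (start : Int) : (List (String × List String)) × Int :=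
  let r := aLoop lines ((lines.length : Int) - (start + 1)).toNat (start + 1) [] [] false 0 1
  ([("then", r.1), ("else", r.2.1)], r.2.2)

-- ===== PORT B =====
-- B's helper _consume_nested: copies lines verbatim until (and including) the matching $endif,
-- returning (copied lines, index after); the while loop's continuation is the trailing
-- recursive call.  fuel ≥ (len - i) + 1 suffices: every call strictly advances the index.
def cNest (lines : List String) : Nat → Int → List String × Int
  | 0, i => ([], i)
  | fuel+1, i =>
    if i < (lines.length : Int) then
      if pvOpens (pvStrip lines i) then
        (pvLine lines i :: ((cNest lines fuel (i+1)).1 ++ (cNest lines fuel (cNest lines fuel (i+1)).2).1),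
          (cNest lines fuel (cNest lines fuel (i+1)).2).2)
      else if pvStrip lines i = "$endif" then ([pvLine lines i], i+1)
      else (pvLine lines i :: (cNest lines fuel (i+1)).1, (cNest lines fuel (i+1)).2)
    else ([], i)

-- B's top-level loop: dispatches on top-level lines only; nested blocks are swallowed by cNest.
def bLoop (lines : List String) : Nat → Int → List String → List String → Bool → Int →
    List String × List String × Int
  | 0, _, thenL, elseL, _, consumed => (thenL, elseL, consumed)
  | fuel+1, i, thenL, elseL, inElse, consumed =>
    if i < (lines.length : Int) then
      if pvOpens (pvStrip lines i) then
        bLoop lines fuel (cNest lines ((lines.length : Int) - i).toNat (i+1)).2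
          (if inElse then thenL else thenL ++ pvLine lines i :: (cNest lines ((lines.length : Int) - i).toNat (i+1)).1)
          (if inElse then elseL ++ pvLine lines i :: (cNest lines ((lines.length : Int) - i).toNat (i+1)).1 else elseL)
          inElse (consumed + 1 + ((cNest lines ((lines.length : Int) - i).toNat (i+1)).2 - (i+1)))
      else if pvStrip lines i = "$endif" then (thenL, elseL, consumed + 1)
      else if pvStrip lines i = "$else" then
        bLoop lines fuel (i+1) thenL elseL true (consumed + 1)
      else
        bLoop lines fuel (i+1) (if inElse then thenL else thenL ++ [pvLine lines i])
          (if inElse then elseL ++ [pvLine lines i] else elseL) inElse (consumed + 1)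
    else (thenL, elseL, consumed)

def collect_ifdef_block_py_alt (lines : List String) (start : Int) : (List (String × List String)) × Int :=
  let r := bLoop lines ((lines.length : Int) - (start + 1)).toNat (start + 1) [] [] false 1
  ([("then", r.1), ("else", r.2.1)], r.2.2)

-- ===== PRECONDITION & SPEC =====
-- Pre_ excludes exactly the inputs where Python A raises IndexError: the first access lines[start+1]
-- (Python negative indexing) is out of range, i.e. start+1 < -len(lines).
def Pre_collect_ifdef_block_py (lines : List String) (start : Int) : Prop :=
  -(lines.length : Int) ≤ start + 1
instance (lines : List String) (start : Int) : Decidable (Pre_collect_ifdef_block_py lines start) := by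
  unfold Pre_collect_ifdef_block_py; infer_instance

def pvWitness_collect_ifdef_block_py : List String × Int := (["x = 1", "$else", "y = 2", "$endif"], -1)

def Spec_collect_ifdef_block_py (lines : List String) (start : Int) (out : (List (String × List String)) × Int) : Prop := out = collect_ifdef_block_py_alt lines start
instance (lines : List String) (start : Int) (out : (List (String × List String)) × Int) : Decidable (Spec_collect_ifdef_block_py lines start out) := by unfold Spec_collect_ifdef_block_py; infer_instance

-- ===== CLAIM (what is proved, stated in full; the proofs are below) =====
def Claim_equal_collect_ifdef_block_py : Prop := ∀ (lines : List String) (start : Int), Dom_collect_ifdef_block_py lines start → Pre_collect_ifdef_block_py lines start → Spec_collect_ifdef_block_py lines start (collect_ifdef_block_py lines start)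

-- ===== LEMMAS AND PROOFS =====

theorem cNest_ge (lines : List String) : ∀ (fuel : Nat) (i : Int), i ≤ (cNest lines fuel i).2 := by
  intro fuel
  induction fuel with
  | zero => intro i; exact le_refl i
  | succ f ih =>
    intro i
    simp only [cNest]
    by_cases hi : i < (lines.length : Int)
    · rw [if_pos hi]
      by_cases ho : pvOpens (pvStrip lines i) = true
      · rw [if_pos ho]
        exact le_trans (le_trans (by omega) (ih (i+1))) (ih _)
      · rw [if_neg ho]
        by_cases he : pvStrip lines i = "$endif"
        · rw [if_pos he]; exact by omega
        · rw [if_neg he]; exact le_trans (by omega) (ih (i+1))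
    · rw [if_neg hi]

theorem cNest_stop (lines : List String) (f : Nat) (i : Int) (hi : ¬ i < (lines.length : Int)) :
    cNest lines f i = ([], i) := by
  cases f <;> simp [cNest, hi]

theorem cNest_fuel_inv (lines : List String) : ∀ (f1 f2 : Nat) (i : Int),
    ((lines.length : Int) - i).toNat + 1 ≤ f1 → ((lines.length : Int) - i).toNat + 1 ≤ f2 →
    cNest lines f1 i = cNest lines f2 i := by
  intro f1
  induction f1 with
  | zero => intro f2 i h1 _; omega
  | succ f ih =>
    intro f2 i h1 h2
    obtain ⟨g, rfl⟩ : ∃ g, f2 = g + 1 := ⟨f2 - 1, by omega⟩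
    by_cases hi : i < (lines.length : Int)
    · simp only [cNest, if_pos hi]
      have hrec1 : cNest lines f (i+1) = cNest lines g (i+1) := ih g (i+1) (by omega) (by omega)
      have hj : i + 1 ≤ (cNest lines g (i+1)).2 := by rw [← hrec1]; exact cNest_ge lines f (i+1)
      have hrec2 : cNest lines f (cNest lines g (i+1)).2 = cNest lines g (cNest lines g (i+1)).2 :=
        ih g _ (by omega) (by omega)
      rw [hrec1, hrec2]
    · rw [cNest_stop lines (f+1) i hi, cNest_stop lines (g+1) i hi]


theorem cNest_succ_ifdef (lines : List String) (f : Nat) (i : Int)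
    (hi : i < (lines.length : Int)) (ho : pvOpens (pvStrip lines i) = true) :
    cNest lines (f+1) i =
      (pvLine lines i :: ((cNest lines f (i+1)).1 ++ (cNest lines f (cNest lines f (i+1)).2).1),
        (cNest lines f (cNest lines f (i+1)).2).2) := by
  simp only [cNest, if_pos hi, if_pos ho]

theorem cNest_succ_endif (lines : List String) (f : Nat) (i : Int)
    (hi : i < (lines.length : Int)) (ho : ¬ pvOpens (pvStrip lines i) = true)
    (he : pvStrip lines i = "$endif") :
    cNest lines (f+1) i = ([pvLine lines i], i+1) := by
  simp only [cNest, if_pos hi, if_neg ho, if_pos he]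

theorem cNest_succ_other (lines : List String) (f : Nat) (i : Int)
    (hi : i < (lines.length : Int)) (ho : ¬ pvOpens (pvStrip lines i) = true)
    (he : ¬ pvStrip lines i = "$endif") :
    cNest lines (f+1) i = (pvLine lines i :: (cNest lines f (i+1)).1, (cNest lines f (i+1)).2) := by
  simp only [cNest, if_pos hi, if_neg ho, if_neg he]

-- Canonical-fuel abbreviations used only inside the proofs.
def A' (lines : List String) (i : Int) (t e : List String) (b : Bool) (d c : Int) :
    List String × List String × Int :=
  aLoop lines (((lines.length : Int) - i).toNat) i t e b d c

def C' (lines : List String) (i : Int) : List String × Int :=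
  cNest lines (((lines.length : Int) - i).toNat + 1) i

def B' (lines : List String) (i : Int) (t e : List String) (b : Bool) (c : Int) :
    List String × List String × Int :=
  bLoop lines (((lines.length : Int) - i).toNat) i t e b c

theorem C'_ge (lines : List String) (i : Int) : i ≤ (C' lines i).2 :=
  cNest_ge lines _ i

theorem C'_stop (lines : List String) (i : Int) (hi : ¬ i < (lines.length : Int)) :
    C' lines i = ([], i) :=
  cNest_stop lines _ i hi

theorem C'_ifdef (lines : List String) (i : Int) (hi : i < (lines.length : Int))
    (ho : pvOpens (pvStrip lines i) = true) :
    C' lines i = (pvLine lines i :: ((C' lines (i+1)).1 ++ (C' lines (C' lines (i+1)).2).1),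
      (C' lines (C' lines (i+1)).2).2) := by
  have hm : ((lines.length : Int) - i).toNat = ((lines.length : Int) - (i+1)).toNat + 1 := by omega
  unfold C'
  rw [hm]
  rw [cNest_succ_ifdef lines _ i hi ho]
  have hj : i + 1 ≤ (cNest lines (((lines.length : Int) - (i+1)).toNat + 1) (i+1)).2 :=
    cNest_ge lines _ (i+1)
  have h2 : cNest lines (((lines.length : Int) - (i+1)).toNat + 1)
        (cNest lines (((lines.length : Int) - (i+1)).toNat + 1) (i+1)).2
      = cNest lines (((lines.length : Int) -
          (cNest lines (((lines.length : Int) - (i+1)).toNat + 1) (i+1)).2).toNat + 1)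
        (cNest lines (((lines.length : Int) - (i+1)).toNat + 1) (i+1)).2 :=
    cNest_fuel_inv lines _ _ _ (by omega) (by omega)
  rw [h2]

theorem C'_endif (lines : List String) (i : Int) (hi : i < (lines.length : Int))
    (ho : ¬ pvOpens (pvStrip lines i) = true) (he : pvStrip lines i = "$endif") :
    C' lines i = ([pvLine lines i], i+1) := by
  have hm : ((lines.length : Int) - i).toNat = ((lines.length : Int) - (i+1)).toNat + 1 := by omega
  unfold C'
  rw [hm]
  rw [cNest_succ_endif lines _ i hi ho he]

theorem C'_other (lines : List String) (i : Int) (hi : i < (lines.length : Int))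
    (ho : ¬ pvOpens (pvStrip lines i) = true) (he : ¬ pvStrip lines i = "$endif") :
    C' lines i = (pvLine lines i :: (C' lines (i+1)).1, (C' lines (i+1)).2) := by
  have hm : ((lines.length : Int) - i).toNat = ((lines.length : Int) - (i+1)).toNat + 1 := by omega
  unfold C'
  rw [hm]
  rw [cNest_succ_other lines _ i hi ho he]

-- One-step characterisations of A' (A's loop at canonical fuel).
theorem A'_stop (lines : List String) (i : Int) (t e : List String) (b : Bool) (d c : Int)
    (hi : ¬ i < (lines.length : Int)) : A' lines i t e b d c = (t, e, c) := by
  unfold A'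
  have h0 : ((lines.length : Int) - i).toNat = 0 := by omega
  rw [h0]
  rfl

theorem A'_ifdef (lines : List String) (i : Int) (t e : List String) (b : Bool) (d c : Int)
    (hi : i < (lines.length : Int)) (ho : pvOpens (pvStrip lines i) = true) :
    A' lines i t e b d c = A' lines (i+1) (if b then t else t ++ [pvLine lines i])
      (if b then e ++ [pvLine lines i] else e) b (d+1) (c+1) := by
  have hm : ((lines.length : Int) - i).toNat = ((lines.length : Int) - (i+1)).toNat + 1 := by omega
  unfold A'
  rw [hm]
  simp only [aLoop, if_pos hi, if_pos ho]

theorem A'_endif0 (lines : List String) (i : Int) (t e : List String) (b : Bool) (c : Int)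
    (hi : i < (lines.length : Int)) (ho : ¬ pvOpens (pvStrip lines i) = true)
    (he : pvStrip lines i = "$endif") :
    A' lines i t e b 0 c = (t, e, c+1) := by
  have hm : ((lines.length : Int) - i).toNat = ((lines.length : Int) - (i+1)).toNat + 1 := by omega
  unfold A'
  rw [hm]
  simp only [aLoop, if_pos hi, if_neg ho, if_pos he]
  simp

theorem A'_endifS (lines : List String) (i : Int) (t e : List String) (b : Bool) (d c : Int)
    (hi : i < (lines.length : Int)) (ho : ¬ pvOpens (pvStrip lines i) = true)
    (he : pvStrip lines i = "$endif") (hd : ¬ d = 0) :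
    A' lines i t e b d c = A' lines (i+1) (if b then t else t ++ [pvLine lines i])
      (if b then e ++ [pvLine lines i] else e) b (d-1) (c+1) := by
  have hm : ((lines.length : Int) - i).toNat = ((lines.length : Int) - (i+1)).toNat + 1 := by omega
  unfold A'
  rw [hm]
  simp only [aLoop, if_pos hi, if_neg ho, if_pos he, if_neg hd]

theorem A'_else0 (lines : List String) (i : Int) (t e : List String) (b : Bool) (c : Int)
    (hi : i < (lines.length : Int)) (ho : ¬ pvOpens (pvStrip lines i) = true)
    (he : ¬ pvStrip lines i = "$endif") (hel : pvStrip lines i = "$else") :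
    A' lines i t e b 0 c = A' lines (i+1) t e true 0 (c+1) := by
  have hm : ((lines.length : Int) - i).toNat = ((lines.length : Int) - (i+1)).toNat + 1 := by omega
  unfold A'
  rw [hm]
  simp only [aLoop, if_pos hi, if_neg ho, if_neg he]
  simp [hel]

theorem A'_other (lines : List String) (i : Int) (t e : List String) (b : Bool) (d c : Int)
    (hi : i < (lines.length : Int)) (ho : ¬ pvOpens (pvStrip lines i) = true)
    (he : ¬ pvStrip lines i = "$endif") (hc : ¬ (pvStrip lines i = "$else" ∧ d = 0)) :
    A' lines i t e b d c = A' lines (i+1) (if b then t else t ++ [pvLine lines i])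
      (if b then e ++ [pvLine lines i] else e) b d (c+1) := by
  have hm : ((lines.length : Int) - i).toNat = ((lines.length : Int) - (i+1)).toNat + 1 := by omega
  unfold A'
  rw [hm]
  simp only [aLoop, if_pos hi, if_neg ho, if_neg he, if_neg hc]

set_option maxHeartbeats 2000000 in
theorem bLoop_fuel_inv (lines : List String) : ∀ (f1 f2 : Nat) (i : Int)
    (t e : List String) (b : Bool) (c : Int),
    ((lines.length : Int) - i).toNat ≤ f1 → ((lines.length : Int) - i).toNat ≤ f2 →
    bLoop lines f1 i t e b c = bLoop lines f2 i t e b c := by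
  intro f1
  induction f1 with
  | zero =>
    intro f2 i t e b c h1 _
    have hi : ¬ i < (lines.length : Int) := by omega
    cases f2 with
    | zero => rfl
    | succ g => simp [bLoop, hi]
  | succ f ih =>
    intro f2 i t e b c h1 h2
    by_cases hi : i < (lines.length : Int)
    · obtain ⟨g, rfl⟩ : ∃ g, f2 = g + 1 := ⟨f2 - 1, by omega⟩
      simp only [bLoop, if_pos hi]
      by_cases ho : pvOpens (pvStrip lines i) = true
      · rw [if_pos ho, if_pos ho]
        have hj : i + 1 ≤ (cNest lines (((lines.length : Int) - i).toNat) (i+1)).2 :=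
          cNest_ge lines _ (i+1)
        generalize hJ : cNest lines (((lines.length : Int) - i).toNat) (i+1) = J at hj ⊢
        refine ih g _ _ _ _ _ ?_ ?_ <;> omega
      · rw [if_neg ho, if_neg ho]
        by_cases he : pvStrip lines i = "$endif"
        · rw [if_pos he, if_pos he]
        · rw [if_neg he, if_neg he]
          by_cases hel : pvStrip lines i = "$else"
          · rw [if_pos hel, if_pos hel]
            refine ih g (i+1) _ _ _ _ ?_ ?_ <;> omega
          · rw [if_neg hel, if_neg hel]
            refine ih g (i+1) _ _ _ _ ?_ ?_ <;> omega
    · cases f2 with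
      | zero => simp [bLoop, hi]
      | succ g => simp [bLoop, hi]

-- One-step characterisations of B' (B's top-level loop at canonical fuel).
theorem B'_stop (lines : List String) (i : Int) (t e : List String) (b : Bool) (c : Int)
    (hi : ¬ i < (lines.length : Int)) : B' lines i t e b c = (t, e, c) := by
  unfold B'
  have h0 : ((lines.length : Int) - i).toNat = 0 := by omega
  rw [h0]
  rfl

set_option maxHeartbeats 2000000 in
theorem B'_ifdef (lines : List String) (i : Int) (t e : List String) (b : Bool) (c : Int)
    (hi : i < (lines.length : Int)) (ho : pvOpens (pvStrip lines i) = true) :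
    B' lines i t e b c = B' lines (C' lines (i+1)).2
      (if b then t else t ++ pvLine lines i :: (C' lines (i+1)).1)
      (if b then e ++ pvLine lines i :: (C' lines (i+1)).1 else e) b
      (c + 1 + ((C' lines (i+1)).2 - (i+1))) := by
  have hm : ((lines.length : Int) - i).toNat = ((lines.length : Int) - (i+1)).toNat + 1 := by omega
  have hcall : cNest lines (((lines.length : Int) - i).toNat) (i+1) = C' lines (i+1) := by
    unfold C'; rw [hm]
  have hj : i + 1 ≤ (C' lines (i+1)).2 := C'_ge lines (i+1)
  unfold B'
  conv_lhs => rw [hm]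
  simp only [bLoop, if_pos hi, if_pos ho, hcall]
  exact bLoop_fuel_inv lines _ _ _ _ _ _ _ (by omega) (by omega)

theorem B'_endif (lines : List String) (i : Int) (t e : List String) (b : Bool) (c : Int)
    (hi : i < (lines.length : Int)) (ho : ¬ pvOpens (pvStrip lines i) = true)
    (he : pvStrip lines i = "$endif") : B' lines i t e b c = (t, e, c+1) := by
  have hm : ((lines.length : Int) - i).toNat = ((lines.length : Int) - (i+1)).toNat + 1 := by omega
  unfold B'
  rw [hm]
  simp only [bLoop, if_pos hi, if_neg ho, if_pos he]

theorem B'_else (lines : List String) (i : Int) (t e : List String) (b : Bool) (c : Int)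
    (hi : i < (lines.length : Int)) (ho : ¬ pvOpens (pvStrip lines i) = true)
    (he : ¬ pvStrip lines i = "$endif") (hel : pvStrip lines i = "$else") :
    B' lines i t e b c = B' lines (i+1) t e true (c+1) := by
  have hm : ((lines.length : Int) - i).toNat = ((lines.length : Int) - (i+1)).toNat + 1 := by omega
  unfold B'
  rw [hm]
  simp only [bLoop, if_pos hi, if_neg ho, if_neg he, if_pos hel]

theorem B'_other (lines : List String) (i : Int) (t e : List String) (b : Bool) (c : Int)
    (hi : i < (lines.length : Int)) (ho : ¬ pvOpens (pvStrip lines i) = true)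
    (he : ¬ pvStrip lines i = "$endif") (hel : ¬ pvStrip lines i = "$else") :
    B' lines i t e b c = B' lines (i+1) (if b then t else t ++ [pvLine lines i])
      (if b then e ++ [pvLine lines i] else e) b (c+1) := by
  have hm : ((lines.length : Int) - i).toNat = ((lines.length : Int) - (i+1)).toNat + 1 := by omega
  unfold B'
  rw [hm]
  simp only [bLoop, if_pos hi, if_neg ho, if_neg he, if_neg hel]

-- A's loop run at depth d+1 (d ≥ 0) copies lines verbatim until the matching $endif —
-- exactly what cNest collects — then continues at depth d.
set_option maxHeartbeats 2000000 in
theorem aLoop_nested (lines : List String) : ∀ (N : Nat) (i : Int),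
    ((lines.length : Int) - i).toNat ≤ N → ∀ (t e : List String) (b : Bool) (d c : Int), 0 ≤ d →
    A' lines i t e b (d+1) c =
      A' lines (C' lines i).2 (if b then t else t ++ (C' lines i).1)
        (if b then e ++ (C' lines i).1 else e) b d (c + ((C' lines i).2 - i)) := by
  intro N
  induction N with
  | zero =>
    intro i hN t e b d c hd
    have hi : ¬ i < (lines.length : Int) := by omega
    rw [C'_stop lines i hi, A'_stop lines i t e b (d+1) c hi]
    have hc0 : c + (i - i) = c := by ring
    rw [A'_stop lines i _ _ b d _ hi, hc0]
    cases b <;> simp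
  | succ N ih =>
    intro i hN t e b d c hd
    by_cases hi : i < (lines.length : Int)
    case neg =>
      rw [C'_stop lines i hi, A'_stop lines i t e b (d+1) c hi]
      have hc0 : c + (i - i) = c := by ring
      rw [A'_stop lines i _ _ b d _ hi, hc0]
      cases b <;> simp
    case pos =>
      by_cases ho : pvOpens (pvStrip lines i) = true
      · -- nested opener: apply the IH twice (inner block, then rest up to our matching $endif)
        rcases hC1 : C' lines (i+1) with ⟨L1, j1⟩
        have h11 : (C' lines (i+1)).1 = L1 := by rw [hC1]
        have h12 : (C' lines (i+1)).2 = j1 := by rw [hC1]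
        have hj1 : i + 1 ≤ j1 := by rw [← h12]; exact C'_ge lines (i+1)
        rcases hC2 : C' lines j1 with ⟨L2, j2⟩
        have h21 : (C' lines j1).1 = L2 := by rw [hC2]
        have h22 : (C' lines j1).2 = j2 := by rw [hC2]
        have hj2 : j1 ≤ j2 := by rw [← h22]; exact C'_ge lines j1
        have hCi : C' lines i = (pvLine lines i :: (L1 ++ L2), j2) := by
          rw [C'_ifdef lines i hi ho, hC1]
          rw [show ((L1, j1) : List String × Int).2 = j1 from rfl, hC2]
        have hCi1 : (C' lines i).1 = pvLine lines i :: (L1 ++ L2) := by rw [hCi]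
        have hCi2 : (C' lines i).2 = j2 := by rw [hCi]
        rw [hCi1, hCi2]
        rw [A'_ifdef lines i t e b (d+1) c hi ho]
        rw [ih (i+1) (by omega) _ _ b (d+1) (c+1) (by omega), h11, h12]
        rw [ih j1 (by omega) _ _ b d _ hd, h21, h22]
        have hc : c + 1 + (j1 - (i+1)) + (j2 - j1) = c + (j2 - i) := by ring
        rw [hc]
        cases b <;> simp
      · by_cases he : pvStrip lines i = "$endif"
        · -- the matching $endif: A appends it, depth returns to d; no recursion needed
          have hCi1 : (C' lines i).1 = [pvLine lines i] := by rw [C'_endif lines i hi ho he]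
          have hCi2 : (C' lines i).2 = i + 1 := by rw [C'_endif lines i hi ho he]
          rw [hCi1, hCi2]
          rw [A'_endifS lines i t e b (d+1) c hi ho he (by omega)]
          have hd1 : d + 1 - 1 = d := by ring
          have hc1 : c + (i + 1 - i) = c + 1 := by ring
          rw [hd1, hc1]
        · -- any other line (including $else at depth > 0): both copy it verbatim
          rcases hC1 : C' lines (i+1) with ⟨L1, j1⟩
          have h11 : (C' lines (i+1)).1 = L1 := by rw [hC1]
          have h12 : (C' lines (i+1)).2 = j1 := by rw [hC1]
          have hCi : C' lines i = (pvLine lines i :: L1, j1) := by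
            rw [C'_other lines i hi ho he, hC1]
          have hCi1 : (C' lines i).1 = pvLine lines i :: L1 := by rw [hCi]
          have hCi2 : (C' lines i).2 = j1 := by rw [hCi]
          rw [hCi1, hCi2]
          rw [A'_other lines i t e b (d+1) c hi ho he (by rintro ⟨_, h⟩; omega)]
          rw [ih (i+1) (by omega) _ _ b d (c+1) hd, h11, h12]
          have hc : c + 1 + (j1 - (i+1)) = c + (j1 - i) := by ring
          rw [hc]
          cases b <;> simp

-- At depth 0, A's loop and B's top-level loop agree.
set_option maxHeartbeats 2000000 in
theorem main_loop_eq (lines : List String) : ∀ (N : Nat) (i : Int),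
    ((lines.length : Int) - i).toNat ≤ N → ∀ (t e : List String) (b : Bool) (c : Int),
    A' lines i t e b 0 c = B' lines i t e b c := by
  intro N
  induction N with
  | zero =>
    intro i hN t e b c
    have hi : ¬ i < (lines.length : Int) := by omega
    rw [A'_stop lines i t e b 0 c hi, B'_stop lines i t e b c hi]
  | succ N ih =>
    intro i hN t e b c
    by_cases hi : i < (lines.length : Int)
    case neg => rw [A'_stop lines i t e b 0 c hi, B'_stop lines i t e b c hi]
    case pos =>
      by_cases ho : pvOpens (pvStrip lines i) = true
      · rcases hC1 : C' lines (i+1) with ⟨L1, j1⟩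
        have h11 : (C' lines (i+1)).1 = L1 := by rw [hC1]
        have h12 : (C' lines (i+1)).2 = j1 := by rw [hC1]
        have hj1 : i + 1 ≤ j1 := by rw [← h12]; exact C'_ge lines (i+1)
        rw [A'_ifdef lines i t e b 0 c hi ho]
        rw [aLoop_nested lines N (i+1) (by omega) _ _ b 0 (c+1) le_rfl, h11, h12]
        rw [ih j1 (by omega)]
        rw [B'_ifdef lines i t e b c hi ho, h11, h12]
        cases b <;> simp
      · by_cases he : pvStrip lines i = "$endif"
        · rw [A'_endif0 lines i t e b c hi ho he, B'_endif lines i t e b c hi ho he]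
        · by_cases hel : pvStrip lines i = "$else"
          · rw [A'_else0 lines i t e b c hi ho he hel, B'_else lines i t e b c hi ho he hel,
              ih (i+1) (by omega)]
          · rw [A'_other lines i t e b 0 c hi ho he (by rintro ⟨h, _⟩; exact hel h),
              B'_other lines i t e b c hi ho he hel, ih (i+1) (by omega)]

-- ===== VERDICT (by name: the statement is the Claim_ definition above) =====
theorem collect_ifdef_block_py_spec : Claim_equal_collect_ifdef_block_py := by
  intro lines start _ _
  unfold Spec_collect_ifdef_block_py collect_ifdef_block_py collect_ifdef_block_py_alt
  have h := main_loop_eq lines (((lines.length : Int) - (start+1)).toNat) (start+1) le_rfl [] [] false 1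
  unfold A' B' at h
  rw [h]
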